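-- pv_equiv track=rewrite | github.com/Parkprogrammer/SKKUOCR | clova_ocr.py | split_line_by_x
-- ===== SOURCE A (Python) =====
-- def split_line_by_x(line, gap_threshold=40):
--     sorted_line = sorted(line, key=lambda item: min(p["x"] for p in item["bbox"]))
--     groups = []
--     current_group = [sorted_line[0]]
--     for prev, curr in zip(sorted_line[:-1], sorted_line[1:]):
--         prev_x = max(p["x"] for p in prev["bbox"])
--         curr_x = min(p["x"] for p in curr["bbox"])
--         gap = curr_x - prev_x
--         if gap > gap_threshold:
--             groups.append(current_group)
--             current_group = [curr]
--         else:
--             current_group.append(curr)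
--     groups.append(current_group)
--     return groups
-- ===== SOURCE B (Python) =====
-- def split_line_by_x(line, gap_threshold=40):
--     def xspan(it):
--         xs = [p["x"] for p in it["bbox"]]
--         return (min(xs), max(xs))
--
--     items = sorted(line, key=lambda it: xspan(it)[0])
--
--     def build(head, rest):
--         if not rest:
--             return [[head]]
--         groups = build(rest[0], rest[1:])
--         if xspan(rest[0])[0] - xspan(head)[1] > gap_threshold:
--             return [[head]] + groups
--         return [[head] + groups[0]] + groups[1:]
--
--     return build(items[0], items[1:])
-- ===== Notes on version B (the rewrite author's own statement) =====
-- stated objective: alternative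
-- what changed: B replaces A's forward accumulator loop (mutating a current group and a list of finished groups) with a recursion over the sorted tail that builds the group list back-to-front, either prepending a fresh singleton group or merging the head item into the first group of the recursive result.
import Mathlib
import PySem

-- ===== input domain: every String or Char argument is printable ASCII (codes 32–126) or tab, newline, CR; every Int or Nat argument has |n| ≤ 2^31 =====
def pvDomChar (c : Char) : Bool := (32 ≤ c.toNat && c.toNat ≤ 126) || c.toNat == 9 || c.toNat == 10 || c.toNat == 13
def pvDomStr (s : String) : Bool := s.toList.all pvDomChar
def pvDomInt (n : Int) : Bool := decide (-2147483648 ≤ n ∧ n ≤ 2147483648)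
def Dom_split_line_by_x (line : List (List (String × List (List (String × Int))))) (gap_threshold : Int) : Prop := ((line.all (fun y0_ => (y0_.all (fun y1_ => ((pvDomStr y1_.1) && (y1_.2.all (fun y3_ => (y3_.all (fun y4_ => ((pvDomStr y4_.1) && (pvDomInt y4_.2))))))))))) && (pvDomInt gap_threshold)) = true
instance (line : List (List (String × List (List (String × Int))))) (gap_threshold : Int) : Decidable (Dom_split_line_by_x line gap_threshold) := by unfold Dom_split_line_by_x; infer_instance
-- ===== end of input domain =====

-- B builds the group list back-to-front by a recursion over the sorted tail (prepend a new
-- singleton group or merge into the head group) instead of A's forward accumulator loop.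

-- ===== PORT A =====
-- min(p["x"] for p in item["bbox"]) / max(...): exact whenever "bbox" is present, nonempty,
-- and every point has key "x" (Pre_ guarantees this; Python raises otherwise).
def pvXsA (item : List (String × List (List (String × Int)))) : List Int :=
  ((List.lookup "bbox" item).getD []).map (fun p => (List.lookup "x" p).getD 0)
def pvMinXA (item : List (String × List (List (String × Int)))) : Int :=
  (PySem.List.min? (pvXsA item) (fun v => v)).getD 0
def pvMaxXA (item : List (String × List (List (String × Int)))) : Int :=
  (PySem.List.max? (pvXsA item) (fun v => v)).getD 0

def split_line_by_x (line : List (List (String × List (List (String × Int))))) (gap_threshold : Int) : List (List (List (String × List (List (String × Int))))) :=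
  match PySem.List.sorted line (fun item => pvMinXA item) false with
  | [] => []   -- Python raises IndexError at sorted_line[0]; excluded by Pre_
  | x0 :: rest =>
    let sorted_line := x0 :: rest
    let st := ((sorted_line.dropLast).zip sorted_line.tail).foldl
      (fun (st : List (List (List (String × List (List (String × Int))))) × List (List (String × List (List (String × Int))))) pc =>
        let prev_x := pvMaxXA pc.1
        let curr_x := pvMinXA pc.2
        let gap := curr_x - prev_x
        if gap > gap_threshold then (st.1 ++ [st.2], [pc.2]) else (st.1, st.2 ++ [pc.2]))
      ([], [x0])
    st.1 ++ [st.2]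

-- ===== PORT B =====
-- xspan(it) = (min(xs), max(xs)); exact under the same Pre_ as A's min/max.
def pvSpanB (item : List (String × List (List (String × Int)))) : Int × Int :=
  let xs := ((List.lookup "bbox" item).getD []).map (fun p => (List.lookup "x" p).getD 0)
  ((PySem.List.min? xs (fun v => v)).getD 0, (PySem.List.max? xs (fun v => v)).getD 0)

-- build(head, rest); the recursive result is always nonempty, so Python's groups[0]/groups[1:]
-- never raise — ported as headD []/tail.
def pvBuildB (gap_threshold : Int) :
    List (String × List (List (String × Int))) → List (List (String × List (List (String × Int)))) →
    List (List (List (String × List (List (String × Int)))))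
  | head, [] => [[head]]
  | head, c :: t =>
    let groups := pvBuildB gap_threshold c t
    if (pvSpanB c).1 - (pvSpanB head).2 > gap_threshold then [head] :: groups
    else ([head] ++ groups.headD []) :: groups.tail

def split_line_by_x_alt (line : List (List (String × List (List (String × Int))))) (gap_threshold : Int) : List (List (List (String × List (List (String × Int))))) :=
  match PySem.List.sorted line (fun it => (pvSpanB it).1) false with
  | [] => []   -- Python raises IndexError at items[0]; excluded by Pre_
  | x0 :: rest => pvBuildB gap_threshold x0 rest

-- ===== PRECONDITION & SPEC =====
-- Pre_ excludes exactly the inputs where Python A raises: the empty line (IndexError at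
-- sorted_line[0]) and items without a "bbox" key / with an empty bbox / with a point lacking
-- key "x" (KeyError / ValueError on min of empty sequence).
def pvBBoxOK (item : List (String × List (List (String × Int)))) : Bool :=
  match List.lookup "bbox" item with
  | none => false
  | some bb => !bb.isEmpty && bb.all (fun p => (List.lookup "x" p).isSome)

def Pre_split_line_by_x (line : List (List (String × List (List (String × Int))))) (gap_threshold : Int) : Prop :=
  line ≠ [] ∧ line.all pvBBoxOK = true
instance (line : List (List (String × List (List (String × Int))))) (gap_threshold : Int) : Decidable (Pre_split_line_by_x line gap_threshold) := by unfold Pre_split_line_by_x; infer_instance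

def pvWitness_split_line_by_x : (List (List (String × List (List (String × Int))))) × Int :=
  ([[("bbox", [[("x", 0)]])], [("bbox", [[("x", 100)]])]], 40)

def Spec_split_line_by_x (line : List (List (String × List (List (String × Int))))) (gap_threshold : Int) (out : List (List (List (String × List (List (String × Int)))))) : Prop := out = split_line_by_x_alt line gap_threshold
instance (line : List (List (String × List (List (String × Int))))) (gap_threshold : Int) (out : List (List (List (String × List (List (String × Int)))))) : Decidable (Spec_split_line_by_x line gap_threshold out) := by
  unfold Spec_split_line_by_x
  haveI i1 : DecidableEq (List (List (String × Int))) := inferInstance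
  haveI i2 : DecidableEq (String × List (List (String × Int))) := inferInstance
  haveI i3 : DecidableEq (List (String × List (List (String × Int)))) := @instDecidableEqList _ i2
  haveI i4 : DecidableEq (List (List (String × List (List (String × Int))))) := @instDecidableEqList _ i3
  haveI i5 : DecidableEq (List (List (List (String × List (List (String × Int)))))) := @instDecidableEqList _ i4
  exact i5 out (split_line_by_x_alt line gap_threshold)

-- ===== CLAIM (what is proved, stated in full; the proofs are below) =====
def Claim_equal_split_line_by_x : Prop := ∀ (line : List (List (String × List (List (String × Int))))) (gap_threshold : Int), Dom_split_line_by_x line gap_threshold → Pre_split_line_by_x line gap_threshold → Spec_split_line_by_x line gap_threshold (split_line_by_x line gap_threshold)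

-- ===== LEMMAS AND PROOFS =====

-- the common grouping spec both ports are reduced to
def pvMergeHead {α : Type} (cur : List α) : List (List α) → List (List α)
  | [] => [cur]
  | g0 :: gs => (cur ++ g0) :: gs

def pvSpecAfter {α : Type} (big : α → α → Bool) : α → List α → List (List α)
  | _, [] => [[]]
  | y, c :: t => (if big y c then [[]] else []) ++ pvMergeHead [c] (pvSpecAfter big c t)

theorem pvMergeHead_mergeHead {α : Type} (cur : List α) (c : α) (l : List (List α)) :
    pvMergeHead cur (pvMergeHead [c] l) = pvMergeHead (cur ++ [c]) l := by
  cases l <;> simp [pvMergeHead]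

theorem pv_zip_dropLast_tail {α : Type} : ∀ (xs : List α), xs.dropLast.zip xs.tail = xs.zip xs.tail
  | [] => rfl
  | [_] => rfl
  | x :: y :: t => by
      simpa [List.dropLast, List.zip] using congrArg (fun l => (x, y) :: l) (pv_zip_dropLast_tail (y :: t))

theorem pvA_loop {α : Type} (R : α → α → Prop) [DecidableRel R] (t : List α) :
    ∀ (y : α) (gs : List (List α)) (cur : List α),
    ((((y :: t).zip t).foldl
        (fun st pc => if R pc.1 pc.2 then (st.1 ++ [st.2], [pc.2]) else (st.1, st.2 ++ [pc.2]))
        (gs, cur)).1 ++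
      [(((y :: t).zip t).foldl
        (fun st pc => if R pc.1 pc.2 then (st.1 ++ [st.2], [pc.2]) else (st.1, st.2 ++ [pc.2]))
        (gs, cur)).2]) = gs ++ pvMergeHead cur (pvSpecAfter (fun a b => decide (R a b)) y t) := by
  induction t with
  | nil => intro y gs cur; simp [pvMergeHead, pvSpecAfter]
  | cons c t ih =>
    intro y gs cur
    by_cases h : R y c
    · simp only [List.zip_cons_cons, List.foldl_cons, ih c, pvSpecAfter, h, decide_true, if_true]
      simp [pvMergeHead]
    · simp only [List.zip_cons_cons, List.foldl_cons, ih c, pvSpecAfter, h, decide_false, if_false]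
      simp [pvMergeHead_mergeHead]

theorem pvBuildB_eq_spec (gap : Int) (t : List (List (String × List (List (String × Int))))) :
    ∀ (y : List (String × List (List (String × Int)))),
    pvBuildB gap y t =
      pvMergeHead [y] (pvSpecAfter (fun a b => decide (pvMinXA b - pvMaxXA a > gap)) y t) := by
  induction t with
  | nil => intro y; simp [pvBuildB, pvSpecAfter, pvMergeHead]
  | cons c t ih =>
    intro y
    have hspan1 : (pvSpanB c).1 = pvMinXA c := rfl
    have hspan2 : (pvSpanB y).2 = pvMaxXA y := rfl
    simp only [pvBuildB, hspan1, hspan2, ih c]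
    by_cases h : pvMinXA c - pvMaxXA y > gap
    · simp only [h, if_true, pvSpecAfter, decide_true, List.cons_append, List.nil_append]
      cases hs : pvSpecAfter (fun a b => decide (pvMinXA b - pvMaxXA a > gap)) c t <;>
        simp [pvMergeHead]
    · simp only [h, if_false, pvSpecAfter, decide_false]
      cases hs : pvSpecAfter (fun a b => decide (pvMinXA b - pvMaxXA a > gap)) c t <;>
        simp [pvMergeHead]

-- ===== VERDICT (by name: the statement is the Claim_ definition above) =====
theorem split_line_by_x_spec : Claim_equal_split_line_by_x := by
  intro line gap_threshold _hdom _hpre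
  unfold Spec_split_line_by_x split_line_by_x split_line_by_x_alt
  have hkey : (fun it => (pvSpanB it).1) = (fun item => pvMinXA item) := rfl
  rw [hkey]
  rcases hit : PySem.List.sorted line (fun item => pvMinXA item) false with _ | ⟨h0, t⟩
  · rfl
  · simp only [List.tail_cons]
    have hz := pv_zip_dropLast_tail (h0 :: t)
    simp only [List.tail_cons] at hz
    rw [hz]
    have hA := pvA_loop (fun a b => pvMinXA b - pvMaxXA a > gap_threshold) t h0 ([]) ([h0])
    rw [hA, List.nil_append, pvBuildB_eq_spec]
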